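-- pv_equiv track=rewrite | github.com/SuzanAlbedween/Data-Structure | sorting algorithms/Rearrange Array Alternately.py | RearrangeArrayAlternately
-- ===== SOURCE A (Python) =====
-- def RearrangeArrayAlternately(arr):
--     n=len(arr)
--     start=0
--     end=n-1
--     while (start < n):
--         k = end
--         temp = arr[end]
--         while (k > start):
--             arr[k] = arr[k - 1]
--             k -= 1
--         arr[start] = temp
--         start += 2
--
--
--
--
--     return arr
-- ===== SOURCE B (Python) =====
-- def RearrangeArrayAlternately(arr):
--     # Two-pointer single pass: build result by taking one element from the
--     # back and one from the front alternately, then write it back in place.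
--     n = len(arr)
--     lo = 0
--     hi = n - 1
--     out = []
--     while lo < hi:
--         out.append(arr[hi])
--         out.append(arr[lo])
--         hi -= 1
--         lo += 1
--     if lo == hi:
--         out.append(arr[lo])
--     arr[:] = out
--     return arr
-- ===== Notes on version B (the rewrite author's own statement) =====
-- stated objective: faster
-- what changed: A repeatedly shifts the whole suffix right to move the last element to the front positions (nested loops, quadratic); B builds the result in one two-pointer pass taking elements alternately from the back and the front.
import Mathlib
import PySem

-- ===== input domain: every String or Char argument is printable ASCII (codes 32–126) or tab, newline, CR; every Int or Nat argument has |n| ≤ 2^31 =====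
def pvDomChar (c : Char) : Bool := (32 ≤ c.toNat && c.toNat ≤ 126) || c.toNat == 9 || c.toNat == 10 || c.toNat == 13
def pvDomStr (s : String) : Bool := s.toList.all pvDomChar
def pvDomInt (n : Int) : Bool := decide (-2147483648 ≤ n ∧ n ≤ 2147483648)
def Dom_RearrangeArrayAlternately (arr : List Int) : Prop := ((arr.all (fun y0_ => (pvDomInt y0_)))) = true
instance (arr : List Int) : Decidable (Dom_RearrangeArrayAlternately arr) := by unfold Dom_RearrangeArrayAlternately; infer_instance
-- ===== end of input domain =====

-- B builds the same rearrangement in one two-pointer pass (back/front alternately)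
-- instead of A's repeated right-shifts of the suffix; the equivalence is about the
-- return value (both Pythons also mutate `arr` in place to that same value).

-- ===== PORT A =====
-- inner while: while k > start: arr[k] = arr[k-1]; k -= 1   (indices always in range)
def pvAInner (arr : List Int) (k start : Nat) : List Int :=
  if k > start then pvAInner (arr.set k (arr.getD (k - 1) 0)) (k - 1) start else arr
termination_by k

-- outer while: while start < n: temp = arr[end]; <shift>; arr[start] = temp; start += 2
def pvAOuter (arr : List Int) (n start endi : Nat) : List Int :=
  if start < n then
    pvAOuter ((pvAInner arr endi start).set start (arr.getD endi 0)) n (start + 2) endi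
  else arr
termination_by n - start

def RearrangeArrayAlternately (arr : List Int) : List Int :=
  pvAOuter arr arr.length 0 (arr.length - 1)

-- ===== PORT B =====
-- while lo < hi: out.append(arr[hi]); out.append(arr[lo]); hi -= 1; lo += 1
def pvBLoop (arr : List Int) (lo hi : Int) : List Int :=
  if lo < hi then
    (PySem.List.pyGet? arr hi).getD 0 :: (PySem.List.pyGet? arr lo).getD 0 ::
      pvBLoop arr (lo + 1) (hi - 1)
  else if lo = hi then [(PySem.List.pyGet? arr lo).getD 0]
  else []
termination_by (hi - lo).toNat
decreasing_by omega

def RearrangeArrayAlternately_alt (arr : List Int) : List Int :=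
  pvBLoop arr 0 ((arr.length : Int) - 1)

-- ===== PRECONDITION & SPEC =====
def Spec_RearrangeArrayAlternately (arr : List Int) (out : List Int) : Prop := out = RearrangeArrayAlternately_alt arr
instance (arr : List Int) (out : List Int) : Decidable (Spec_RearrangeArrayAlternately arr out) := by unfold Spec_RearrangeArrayAlternately; infer_instance

-- ===== CLAIM (what is proved, stated in full; the proofs are below) =====
def Claim_equal_RearrangeArrayAlternately : Prop := ∀ (arr : List Int), Dom_RearrangeArrayAlternately arr → Spec_RearrangeArrayAlternately arr (RearrangeArrayAlternately arr)

-- ===== LEMMAS AND PROOFS =====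

-- common specification: interleave the array from the back and the front, outside in
def pvMix : List Int → List Int
  | [] => []
  | [x] => [x]
  | x :: y :: rest => (y :: rest).getLast! :: x :: pvMix ((y :: rest).dropLast)
termination_by xs => xs.length
decreasing_by simp

theorem pvGetD_eq (arr : List Int) (n : Nat) (h : n < arr.length) : arr.getD n 0 = arr[n] := by
  simp [List.getD_eq_getElem?_getD, List.getElem?_eq_getElem h]

theorem pvPyGetD (arr : List Int) (i : Int) (h0 : 0 ≤ i) :
    (PySem.List.pyGet? arr i).getD 0 = arr.getD i.toNat 0 := by
  rw [PySem.List.pyGet?_of_nonneg arr h0, List.getD_eq_getElem?_getD]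

theorem pvMix_cons_concat (x z : Int) (m : List Int) :
    pvMix (x :: m ++ [z]) = z :: x :: pvMix m := by
  cases m with
  | nil => simp [pvMix, List.getLast!_eq_getLast?_getD]
  | cons y m' =>
    show pvMix (x :: y :: (m' ++ [z])) = _
    rw [pvMix]
    have h1 : (y :: (m' ++ [z])).getLast! = z := by
      rw [List.getLast!_eq_getLast?_getD,
          show y :: (m' ++ [z]) = (y :: m') ++ [z] from by simp, List.getLast?_concat]
      rfl
    have h2 : (y :: (m' ++ [z])).dropLast = y :: m' := by
      rw [show y :: (m' ++ [z]) = (y :: m') ++ [z] from by simp, List.dropLast_concat]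
    rw [h1, h2]

-- pvMix of the length-n2 slice starting at m, peeled one step at each end
theorem pvMix_slice (arr : List Int) (m n2 : Nat) (h2 : 2 ≤ n2) (hle : m + n2 ≤ arr.length) :
    pvMix ((arr.drop m).take n2)
      = arr.getD (m + n2 - 1) 0 :: arr.getD m 0 :: pvMix ((arr.drop (m + 1)).take (n2 - 2)) := by
  have hSlen : ((arr.drop m).take n2).length = n2 := by simp; omega
  obtain ⟨x, rest, hSm⟩ : ∃ x rest, (arr.drop m).take n2 = x :: rest := by
    match hh : (arr.drop m).take n2 with
    | [] => rw [hh] at hSlen; simp at hSlen; omega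
    | a :: t => exact ⟨a, t, rfl⟩
  have hrne : rest ≠ [] := by
    intro hh; rw [hSm, hh] at hSlen; simp at hSlen; omega
  obtain ⟨MID, z, hrm⟩ : ∃ mid zz, rest = mid ++ [zz] :=
    ⟨rest.dropLast, rest.getLast hrne, (List.dropLast_append_getLast hrne).symm⟩
  have hMIDlen : MID.length = n2 - 2 := by
    rw [hSm, hrm] at hSlen; simp at hSlen; omega
  have hx : x = arr.getD m 0 := by
    have h0 : ((arr.drop m).take n2)[0]? = some x := by rw [hSm]; rfl
    rw [List.getElem?_take_of_lt (by omega), List.getElem?_drop, Nat.add_zero] at h0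
    rw [List.getD_eq_getElem?_getD, h0]
    rfl
  have hz : z = arr.getD (m + n2 - 1) 0 := by
    have h0 : ((arr.drop m).take n2)[n2 - 1]? = some z := by
      rw [hSm, hrm, show (x :: (MID ++ [z])) = (x :: MID) ++ [z] from by simp,
          show n2 - 1 = (x :: MID).length from by simp [hMIDlen]; omega,
          List.getElem?_concat_length]
    rw [List.getElem?_take_of_lt (by omega), List.getElem?_drop] at h0
    rw [List.getD_eq_getElem?_getD, show m + n2 - 1 = m + (n2 - 1) from by omega, h0]
    rfl
  have hmid : MID = (arr.drop (m + 1)).take (n2 - 2) := by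
    have h0 : ((arr.drop m).take n2).dropLast.tail = MID := by
      rw [hSm, hrm, show (x :: (MID ++ [z])) = (x :: MID) ++ [z] from by simp,
          List.dropLast_concat]
      rfl
    rw [List.dropLast_eq_take, hSlen, List.take_take,
        show min (n2 - 1) n2 = n2 - 1 from by omega,
        ← List.drop_one, List.drop_take, List.drop_drop] at h0
    rw [← h0]
    congr 1
  rw [hSm, hrm, hx, hz, hmid]
  exact pvMix_cons_concat _ _ _

-- the inner loop shifts the segment (start, k] one place to the right
theorem pvAInner_eq : ∀ (k : Nat) (arr : List Int) (s : Nat), s ≤ k → k < arr.length →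
    pvAInner arr k s = arr.take (s + 1) ++ (arr.drop s).take (k - s) ++ arr.drop (k + 1) := by
  intro k
  induction k using Nat.strong_induction_on with
  | _ k ih =>
    intro arr s hs hk
    rw [pvAInner]
    by_cases h : k > s
    · simp only [if_pos h]
      rw [ih (k - 1) (by omega) _ s (by omega) (by simp; omega)]
      rw [List.set_eq_take_cons_drop _ hk]
      have htl : (arr.take k).length = k := by simp; omega
      have h1 : ((arr.take k ++ arr.getD (k - 1) 0 :: arr.drop (k + 1)).take (s + 1))
          = arr.take (s + 1) := by
        rw [List.take_append_of_le_length (by omega), List.take_take]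
        congr 1; omega
      have h2 : ((arr.take k ++ arr.getD (k - 1) 0 :: arr.drop (k + 1)).drop s)
          = (arr.drop s).take (k - s) ++ arr.getD (k - 1) 0 :: arr.drop (k + 1) := by
        rw [List.drop_append_of_le_length (by omega), List.drop_take]
      have h4 : ((arr.drop s).take (k - s)).take (k - 1 - s)
          = (arr.drop s).take (k - 1 - s) := by
        rw [List.take_take]; congr 1; omega
      have h5 : (arr.take k ++ arr.getD (k - 1) 0 :: arr.drop (k + 1)).drop (k - 1 + 1)
          = arr.getD (k - 1) 0 :: arr.drop (k + 1) := by
        have hkk : k - 1 + 1 = (arr.take k).length := by omega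
        rw [hkk, List.drop_left]
      rw [h1, h2, h5]
      rw [List.take_append_of_le_length (by simp; omega), h4]
      have h6 : (arr.drop s).take (k - s)
          = (arr.drop s).take (k - 1 - s) ++ [arr.getD (k - 1) 0] := by
        have hk1 : k - s = (k - 1 - s) + 1 := by omega
        have hidx : s + (k - 1 - s) = k - 1 := by omega
        have hsome : (arr.drop s)[k - 1 - s]? = some arr[k - 1] := by
          rw [List.getElem?_drop, hidx, List.getElem?_eq_getElem (by omega)]
        rw [hk1, List.take_add_one, hsome, pvGetD_eq arr (k - 1) (by omega)]
        rfl
      rw [h6]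
      simp
    · simp only [if_neg h]
      have hks : k = s := by omega
      subst hks
      simp [List.take_append_drop]

-- one outer iteration moves the last element to position s; induction on the fuel
theorem pvAOuter_eq (n : Nat) : ∀ (d s : Nat), n - s ≤ d → ∀ (arr : List Int), arr.length = n →
    pvAOuter arr n s (n - 1) = arr.take s ++ pvMix (arr.drop s) := by
  intro d
  induction d with
  | zero =>
    intro s hd arr hlen
    rw [pvAOuter]
    have hsn : ¬ s < n := by omega
    simp only [if_neg hsn]
    rw [List.drop_eq_nil_of_le (show arr.length ≤ s from by omega),
        List.take_of_length_le (show arr.length ≤ s from by omega)]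
    simp [pvMix]
  | succ d ihd =>
    intro s hd arr hlen
    rw [pvAOuter]
    by_cases hsn : s < n
    · simp only [if_pos hsn]
      rw [pvAInner_eq (n - 1) arr s (by omega) (by omega)]
      rw [List.drop_eq_nil_of_le (show arr.length ≤ n - 1 + 1 from by omega), List.append_nil]
      have hsl : s < (arr.take (s + 1) ++ (arr.drop s).take (n - 1 - s)).length := by
        simp; omega
      rw [List.set_eq_take_cons_drop (arr.getD (n - 1) 0) hsl]
      have htake1 : (arr.take (s + 1)).length = s + 1 := by simp; omega
      have hLtake : (arr.take (s + 1) ++ (arr.drop s).take (n - 1 - s)).take s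
          = arr.take s := by
        rw [List.take_append_of_le_length (by simp; omega), List.take_take]
        congr 1; omega
      have hLdrop : (arr.take (s + 1) ++ (arr.drop s).take (n - 1 - s)).drop (s + 1)
          = (arr.drop s).take (n - 1 - s) := by
        have h := List.drop_left (l₁ := arr.take (s + 1)) (l₂ := (arr.drop s).take (n - 1 - s))
        rw [htake1] at h
        exact h
      rw [hLtake, hLdrop]
      have hne : arr.drop s ≠ [] := by
        intro hh
        have := congrArg List.length hh
        simp [hlen] at this
        omega
      obtain ⟨MID, z, hDm⟩ : ∃ mid zz, arr.drop s = mid ++ [zz] :=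
        ⟨(arr.drop s).dropLast, (arr.drop s).getLast hne,
          (List.dropLast_append_getLast hne).symm⟩
      have hMIDlen : MID.length = n - s - 1 := by
        have := congrArg List.length hDm
        simp [hlen] at this
        omega
      have hveq : arr.getD (n - 1) 0 = z := by
        rw [List.getD_eq_getElem?_getD, show n - 1 = s + (n - 1 - s) from by omega,
            ← List.getElem?_drop, hDm, show n - 1 - s = MID.length from by omega,
            List.getElem?_concat_length]
        rfl
      have hMeq : (arr.drop s).take (n - 1 - s) = MID := by
        rw [hDm, show n - 1 - s = MID.length from by omega, List.take_left]
      rw [hveq, hMeq]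
      have harr3 : (arr.take s ++ z :: MID).length = n := by simp; omega
      rw [ihd (s + 2) (by omega) _ harr3]
      have hts : (arr.take s).length = s := by simp; omega
      have htk : (arr.take s ++ z :: MID).take (s + 2) = arr.take s ++ (z :: MID).take 2 := by
        rw [show s + 2 = (arr.take s).length + 2 from by omega, List.take_length_add_append]
      have hdr : (arr.take s ++ z :: MID).drop (s + 2) = (z :: MID).drop 2 := by
        rw [show s + 2 = (arr.take s).length + 2 from by omega, List.drop_length_add_append]
      rw [htk, hdr, List.append_assoc, hDm]
      congr 1
      cases MID with
      | nil => simp [pvMix]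
      | cons x MID' =>
        exact (pvMix_cons_concat x z MID').symm
    · simp only [if_neg hsn]
      rw [List.drop_eq_nil_of_le (show arr.length ≤ s from by omega),
          List.take_of_length_le (show arr.length ≤ s from by omega)]
      simp [pvMix]

-- B's two-pointer loop computes pvMix of the slice [lo, hi]
theorem pvBLoop_eq (arr : List Int) : ∀ (d : Nat) (lo hi : Int), (hi - lo).toNat ≤ d →
    0 ≤ lo → hi < (arr.length : Int) →
    pvBLoop arr lo hi = pvMix ((arr.drop lo.toNat).take (hi - lo + 1).toNat) := by
  intro d
  induction d with
  | zero =>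
    intro lo hi hd hlo hhi
    rw [pvBLoop]
    have hnl : ¬ lo < hi := by omega
    simp only [if_neg hnl]
    by_cases heq : lo = hi
    · simp only [if_pos heq]
      subst heq
      rw [show (lo - lo + 1).toNat = 1 from by omega]
      have hlt' : lo.toNat < arr.length := by omega
      have h2 : (arr.drop lo.toNat).take 1 = [arr.getD lo.toNat 0] := by
        rw [show (1 : Nat) = 0 + 1 from rfl, List.take_add_one, List.getElem?_drop,
            Nat.add_zero, List.getElem?_eq_getElem hlt']
        simp [List.getD_eq_getElem?_getD, List.getElem?_eq_getElem hlt']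
      rw [h2, pvPyGetD arr lo hlo]
      simp [pvMix]
    · simp only [if_neg heq]
      rw [show (hi - lo + 1).toNat = 0 from by omega]
      simp [pvMix]
  | succ d ihd =>
    intro lo hi hd hlo hhi
    rw [pvBLoop]
    by_cases hlt : lo < hi
    · simp only [if_pos hlt]
      rw [ihd (lo + 1) (hi - 1) (by omega) (by omega) (by omega)]
      rw [pvPyGetD arr lo hlo, pvPyGetD arr hi (by omega)]
      rw [show (lo + 1).toNat = lo.toNat + 1 from by omega,
          show (hi - 1 - (lo + 1) + 1).toNat = (hi - lo + 1).toNat - 2 from by omega]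
      rw [pvMix_slice arr lo.toNat (hi - lo + 1).toNat (by omega) (by omega)]
      rw [show lo.toNat + (hi - lo + 1).toNat - 1 = hi.toNat from by omega]
    · simp only [if_neg hlt]
      by_cases heq : lo = hi
      · simp only [if_pos heq]
        subst heq
        rw [show (lo - lo + 1).toNat = 1 from by omega]
        have hlt' : lo.toNat < arr.length := by omega
        have h2 : (arr.drop lo.toNat).take 1 = [arr.getD lo.toNat 0] := by
          rw [show (1 : Nat) = 0 + 1 from rfl, List.take_add_one, List.getElem?_drop,
              Nat.add_zero, List.getElem?_eq_getElem hlt']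
          simp [List.getD_eq_getElem?_getD, List.getElem?_eq_getElem hlt']
        rw [h2, pvPyGetD arr lo hlo]
        simp [pvMix]
      · simp only [if_neg heq]
        rw [show (hi - lo + 1).toNat = 0 from by omega]
        simp [pvMix]

-- ===== VERDICT (by name: the statement is the Claim_ definition above) =====
theorem RearrangeArrayAlternately_spec : Claim_equal_RearrangeArrayAlternately := by
  intro arr _
  unfold Spec_RearrangeArrayAlternately RearrangeArrayAlternately RearrangeArrayAlternately_alt
  rw [pvAOuter_eq arr.length arr.length 0 (by omega) arr rfl,
      pvBLoop_eq arr arr.length 0 ((arr.length : Int) - 1) (by omega) (by omega) (by omega)]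
  rw [show ((arr.length : Int) - 1 - 0 + 1).toNat = arr.length from by omega]
  simp [List.take_length]
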